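-- pv_equiv track=rewrite | github.com/Jeff-Stoyanoff/Algo-Practice | codewars_6.py | queue_time
-- ===== SOURCE A (Python) =====
-- def queue_time(customers, n):
--     first_five = customers[0:n]
--     remaining = customers[n:]
--
--     if customers == []:
--         return 0
--
--     for customer_time in remaining:
--         open_till = min(first_five)
--         open_spot = first_five.index(open_till)
--         first_five[open_spot] = open_till + customer_time
--
--     return max(first_five)
-- ===== SOURCE B (Python) =====
-- def _insort(tills, t):
--     # insert t into the ascending-sorted list tills, keeping it sorted
--     i = 0
--     while i < len(tills) and tills[i] <= t:
--         i += 1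
--     return tills[:i] + [t] + tills[i:]
--
--
-- def queue_time(customers, n):
--     if customers == []:
--         return 0
--     tills = sorted(customers[0:n])
--     for customer_time in customers[n:]:
--         tills = _insort(tills[1:], tills[0] + customer_time)
--     return tills[-1]
-- ===== Notes on version B (the rewrite author's own statement) =====
-- stated objective: alternative
-- what changed: B keeps the till loads in an ascending sorted list (built once with sorted()) and each step pops the front (the least-loaded till) and re-inserts the new load at its sorted position, instead of A's per-customer min()+index() scan and in-place update of an unsorted list; the answer is the last element instead of max().
import Mathlib
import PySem

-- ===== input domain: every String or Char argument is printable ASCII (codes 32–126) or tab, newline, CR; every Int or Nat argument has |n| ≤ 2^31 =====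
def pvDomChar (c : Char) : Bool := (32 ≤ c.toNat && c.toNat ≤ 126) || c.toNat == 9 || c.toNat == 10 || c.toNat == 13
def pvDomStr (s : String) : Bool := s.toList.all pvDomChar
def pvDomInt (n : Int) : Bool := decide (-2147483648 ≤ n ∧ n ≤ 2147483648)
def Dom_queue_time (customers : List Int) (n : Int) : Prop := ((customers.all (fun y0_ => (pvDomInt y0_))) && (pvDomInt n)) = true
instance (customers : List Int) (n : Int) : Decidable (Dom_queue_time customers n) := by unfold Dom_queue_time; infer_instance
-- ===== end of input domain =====

-- B replaces A's per-customer min()+index() scan of an unsorted till list by a sorted till list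
-- with pop-front + recursive ordered insert (objective: alternative algorithm, same asymptotic cost).


-- ===== PORT A =====
-- one iteration of A's loop body: open_till = min(first_five); open_spot = first_five.index(open_till);
-- first_five[open_spot] = open_till + customer_time.  (none cases = Python raising, outside Pre_)
def qtaStep (ff : List Int) (customer_time : Int) : List Int :=
  match PySem.List.min? ff (fun x => x) with
  | none => ff
  | some open_till =>
    match PySem.List.index? ff open_till with
    | none => ff
    | some open_spot => ff.set open_spot (open_till + customer_time)

def queue_time (customers : List Int) (n : Int) : Int :=
  let first_five := PySem.List.slice customers (some 0) (some n)
  let remaining := PySem.List.slice customers (some n) none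
  if customers = [] then 0
  else (PySem.List.max? (remaining.foldl qtaStep first_five) (fun x => x)).getD 0

-- ===== PORT B =====
-- _insort's while loop: i counts the leading elements ≤ t
def insortIdx (tills : List Int) (t : Int) : Nat :=
  match tills with
  | [] => 0
  | x :: xs => if x ≤ t then insortIdx xs t + 1 else 0

-- _insort: tills[:i] + [t] + tills[i:]
def insortQT (tills : List Int) (t : Int) : List Int :=
  let i := insortIdx tills t
  PySem.List.slice tills none (some ((i : Nat) : Int)) ++ [t] ++
    PySem.List.slice tills (some ((i : Nat) : Int)) none

-- one iteration of B's loop body: tills = _insort(tills[1:], tills[0] + customer_time)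
-- (none case = Python's tills[0] raising IndexError, outside Pre_)
def qtbStep (tills : List Int) (customer_time : Int) : List Int :=
  match PySem.List.pyGet? tills 0 with
  | none => tills
  | some h => insortQT (PySem.List.slice tills (some 1) none) (h + customer_time)

def queue_time_alt (customers : List Int) (n : Int) : Int :=
  if customers = [] then 0
  else
    let tills0 := PySem.List.sorted (PySem.List.slice customers (some 0) (some n)) (fun x => x)
    let final := (PySem.List.slice customers (some n) none).foldl qtbStep tills0
    (PySem.List.pyGet? final (-1)).getD 0

-- ===== PRECONDITION & SPEC =====
-- Pre_ excludes only the inputs where A raises (ValueError: min() of the empty till slice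
-- customers[0:n], i.e. customers nonempty with n = 0 or n ≤ -len); B raises there too (IndexError).
def Pre_queue_time (customers : List Int) (n : Int) : Prop :=
  customers = [] ∨ 1 ≤ n ∨ (n < 0 ∧ 1 ≤ n + customers.length)
instance (customers : List Int) (n : Int) : Decidable (Pre_queue_time customers n) := by
  unfold Pre_queue_time; infer_instance
def pvWitness_queue_time : List Int × Int := ([5, 3, 4], 2)

def Spec_queue_time (customers : List Int) (n : Int) (out : Int) : Prop := out = queue_time_alt customers n
instance (customers : List Int) (n : Int) (out : Int) : Decidable (Spec_queue_time customers n out) := by unfold Spec_queue_time; infer_instance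

-- ===== CLAIM (what is proved, stated in full; the proofs are below) =====
def Claim_equal_queue_time : Prop := ∀ (customers : List Int) (n : Int), Dom_queue_time customers n → Pre_queue_time customers n → Spec_queue_time customers n (queue_time customers n)

-- ===== LEMMAS AND PROOFS =====

-- setting at the index of the first occurrence
theorem set_at_append (pre suf : List Int) (m v : Int) :
    (pre ++ m :: suf).set pre.length v = pre ++ v :: suf := by
  induction pre with
  | nil => rfl
  | cons a t ih => simp [ih]

theorem insortQT_nil (t : Int) : insortQT [] t = [t] := by
  simp [insortQT, insortIdx, PySem.List.slice]

theorem insortQT_cons (x : Int) (xs : List Int) (t : Int) :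
    insortQT (x :: xs) t = if x ≤ t then x :: insortQT xs t else t :: x :: xs := by
  by_cases h : x ≤ t
  · simp only [insortQT, insortIdx, if_pos h]
    rw [PySem.List.slice_to_natCast, PySem.List.slice_to_natCast,
        PySem.List.slice_from_natCast, PySem.List.slice_from_natCast]
    simp [List.take_succ_cons, List.drop_succ_cons]
  · simp only [insortQT, insortIdx, if_neg h]
    rw [show ((0 : Nat) : Int) = ((0 : Nat) : Int) from rfl]
    rw [PySem.List.slice_to_natCast, PySem.List.slice_from_natCast]
    simp

theorem insortQT_perm (s : List Int) (t : Int) : (insortQT s t).Perm (t :: s) := by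
  induction s with
  | nil => simp [insortQT_nil]
  | cons x xs ih =>
    rw [insortQT_cons]
    by_cases h : x ≤ t
    · simp only [if_pos h]
      exact (ih.cons x).trans (List.Perm.swap t x xs)
    · simp [if_neg h]

theorem insortQT_pairwise (s : List Int) (t : Int) (hs : s.Pairwise (· ≤ ·)) :
    (insortQT s t).Pairwise (· ≤ ·) := by
  induction s with
  | nil => simp [insortQT_nil]
  | cons x xs ih =>
    rcases List.pairwise_cons.mp hs with ⟨hx, hxs⟩
    rw [insortQT_cons]
    by_cases h : x ≤ t
    · simp only [if_pos h]
      refine List.pairwise_cons.mpr ⟨?_, ih hxs⟩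
      intro y hy
      have := (insortQT_perm xs t).mem_iff.mp hy
      rcases List.mem_cons.mp this with rfl | hy'
      · exact h
      · exact hx y hy'
    · simp only [if_neg h]
      refine List.pairwise_cons.mpr ⟨?_, hs⟩
      intro y hy
      rcases List.mem_cons.mp hy with rfl | hy
      · exact le_of_not_ge h
      · exact le_trans (le_of_not_ge h) (hx y hy)

theorem min?_some_of_ne_nil (xs : List Int) (h : xs ≠ []) :
    ∃ m, PySem.List.min? xs (fun x => x) = some m := by
  cases hm : PySem.List.min? xs (fun x => x) with
  | none => exact absurd ((PySem.List.min?_eq_none_iff xs _).mp hm) h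
  | some m => exact ⟨m, rfl⟩

-- the last element of a ≤-sorted list is an upper bound
theorem le_getLast_of_pairwise (s : List Int) (hs : s.Pairwise (· ≤ ·)) (hne : s ≠ []) :
    ∀ y ∈ s, y ≤ s.getLast hne := by
  induction s with
  | nil => intro y hy; cases hy
  | cons x xs ih =>
    intro y hy
    rcases List.pairwise_cons.mp hs with ⟨hx, hxs⟩
    cases xs with
    | nil => simp at hy; simp [hy, List.getLast]
    | cons b bs =>
      rw [List.getLast_cons (by simp)]
      rcases List.mem_cons.mp hy with rfl | hy'
      · exact le_trans (hx b (by simp))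
          (ih hxs (by simp) b List.mem_cons_self)
      · exact ih hxs (by simp) y hy'

theorem pyGet?_neg_one (s : List Int) (hne : s ≠ []) :
    PySem.List.pyGet? s (-1) = some (s.getLast hne) := by
  have hlen : 1 ≤ s.length := List.length_pos_iff.mpr hne
  simp only [PySem.List.pyGet?, PySem.List.pyIdx?]
  have h1 : ¬ (0:Int) ≤ -1 := by omega
  have h2 : -(s.length : Int) ≤ -1 := by omega
  simp only [if_neg h1, if_pos h2]
  simp only [Option.bind_some]
  rw [List.getLast_eq_getElem]
  rw [List.getElem?_eq_getElem (by omega)]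
  congr 1

-- the step invariant: s is a sorted rearrangement of ff; both step to related lists
theorem step_inv (ff s : List Int) (c : Int) (hne : ff ≠ [])
    (hp : s.Perm ff) (hs : s.Pairwise (· ≤ ·)) :
    (qtbStep s c).Perm (qtaStep ff c) ∧ (qtbStep s c).Pairwise (· ≤ ·) ∧ qtaStep ff c ≠ [] := by
  obtain ⟨m, hm⟩ := min?_some_of_ne_nil ff hne
  have hmmem : m ∈ ff := PySem.List.min?_mem hm
  have hmmin : ∀ y ∈ ff, m ≤ y := PySem.List.min?_isMin hm
  obtain ⟨i, hi⟩ : ∃ i, PySem.List.index? ff m = some i := by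
    cases hidx : PySem.List.index? ff m with
    | none =>
      have := (PySem.List.index?_isSome_iff ff m).mpr hmmem
      rw [hidx] at this; cases this
    | some i => exact ⟨i, rfl⟩
  obtain ⟨pre, suf, hff, hlen, -⟩ := (PySem.List.index?_eq_some_iff ff m i).mp hi
  -- A's step
  have hA : qtaStep ff c = pre ++ (m + c) :: suf := by
    simp only [qtaStep, hm, hi]
    rw [hff, ← hlen, set_at_append]
  -- s is nonempty; its head is m
  have hsne : s ≠ [] := by
    intro h; rw [h] at hp; exact hne hp.symm.eq_nil
  obtain ⟨h0, rest, rfl⟩ : ∃ h0 rest, s = h0 :: rest := by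
    cases s with | nil => exact absurd rfl hsne | cons a b => exact ⟨a, b, rfl⟩
  have hheadmin : ∀ y ∈ h0 :: rest, h0 ≤ y := by
    intro y hy
    rcases List.mem_cons.mp hy with rfl | hy'
    · exact le_refl _
    · exact (List.pairwise_cons.mp hs).1 y hy'
  have hh0 : h0 = m := by
    have h1 : m ≤ h0 := hmmin h0 (hp.mem_iff.mp (by simp))
    have h2 : h0 ≤ m := hheadmin m (hp.mem_iff.mpr hmmem)
    omega
  -- B's step
  have hB : qtbStep (h0 :: rest) c = insortQT rest (m + c) := by
    simp [qtbStep, PySem.List.pyGet?, PySem.List.pyIdx?, PySem.List.slice_from_one, hh0]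
  have hrest : rest.Perm (pre ++ suf) := by
    have : (h0 :: rest).Perm (m :: (pre ++ suf)) := by
      rw [hff] at hp; exact hp.trans List.perm_middle
    rw [hh0] at this
    exact (List.perm_cons m).mp this
  have hrestp : rest.Pairwise (· ≤ ·) := (List.pairwise_cons.mp hs).2
  refine ⟨?_, ?_, ?_⟩
  · rw [hA, hB]
    exact ((insortQT_perm rest (m + c)).trans (hrest.cons (m + c))).trans List.perm_middle.symm
  · rw [hB]; exact insortQT_pairwise rest (m + c) hrestp
  · rw [hA]; simp
theorem fold_inv (rem ff s : List Int) (hne : ff ≠ [])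
    (hp : s.Perm ff) (hs : s.Pairwise (· ≤ ·)) :
    (rem.foldl qtbStep s).Perm (rem.foldl qtaStep ff) ∧
    (rem.foldl qtbStep s).Pairwise (· ≤ ·) ∧ rem.foldl qtaStep ff ≠ [] := by
  induction rem generalizing ff s with
  | nil => exact ⟨hp, hs, hne⟩
  | cons c cs ih =>
    obtain ⟨h1, h2, h3⟩ := step_inv ff s c hne hp hs
    simpa using ih (qtaStep ff c) (qtbStep s c) h3 h1 h2

-- extraction: max() of ff equals the last element of its sorted rearrangement s
theorem extract_eq (ff s : List Int) (hne : ff ≠ [])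
    (hp : s.Perm ff) (hs : s.Pairwise (· ≤ ·)) :
    (PySem.List.max? ff (fun x => x)).getD 0 = (PySem.List.pyGet? s (-1)).getD 0 := by
  have hsne : s ≠ [] := by
    intro h; rw [h] at hp; exact hne hp.symm.eq_nil
  obtain ⟨M, hM⟩ : ∃ M, PySem.List.max? ff (fun x => x) = some M := by
    cases hm : PySem.List.max? ff (fun x => x) with
    | none => exact absurd ((PySem.List.max?_eq_none_iff ff _).mp hm) hne
    | some M => exact ⟨M, rfl⟩
  rw [hM, pyGet?_neg_one s hsne]
  have hMmem : M ∈ ff := PySem.List.max?_mem hM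
  have hMmax : ∀ y ∈ ff, y ≤ M := PySem.List.max?_isMax hM
  have hLmem : s.getLast hsne ∈ ff := hp.mem_iff.mp (List.getLast_mem hsne)
  have h1 : s.getLast hsne ≤ M := hMmax _ hLmem
  have h2 : M ≤ s.getLast hsne :=
    le_getLast_of_pairwise s hs hsne M (hp.mem_iff.mpr hMmem)
  simp; omega

-- Pre_ makes the initial till slice nonempty
theorem slice_ne_nil (customers : List Int) (n : Int) (hcs : customers ≠ [])
    (hpre : Pre_queue_time customers n) :
    PySem.List.slice customers (some 0) (some n) ≠ [] := by
  have hlen : 1 ≤ customers.length := List.length_pos_iff.mpr hcs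
  rcases hpre with h | h | ⟨h1, h2⟩
  · exact absurd h hcs
  · rw [PySem.List.slice_toNat customers (by omega) (le_trans (by omega) h)]
    simp only [Int.toNat_zero, List.drop_zero]
    rw [Ne, List.take_eq_nil_iff]
    push Not
    constructor
    · omega
    · exact hcs
  · have hk : 0 < (-n).toNat := by omega
    have hn : n = -(((-n).toNat : Nat) : Int) := by omega
    rw [hn]
    rw [PySem.List.slice_zero_start, PySem.List.slice_to_neg_natCast customers ((-n).toNat) hk]
    rw [Ne, List.take_eq_nil_iff]
    push Not
    constructor
    · omega
    · exact hcs

-- ===== VERDICT (by name: the statement is the Claim_ definition above) =====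
theorem queue_time_spec : Claim_equal_queue_time := by
  intro customers n _ hpre
  unfold Spec_queue_time queue_time queue_time_alt
  by_cases hcs : customers = []
  · simp [hcs]
  · simp only [if_neg hcs]
    have hne := slice_ne_nil customers n hcs hpre
    have hp := PySem.List.sorted_perm (PySem.List.slice customers (some 0) (some n)) (fun x => x) false
    have hs := PySem.List.sorted_pairwise (κ := Int) (PySem.List.slice customers (some 0) (some n)) (fun x => x)
    obtain ⟨h1, h2, h3⟩ := fold_inv (PySem.List.slice customers (some n) none) _ _ hne hp hs
    exact extract_eq _ _ h3 h1 h2
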